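-- pv_equiv track=rewrite | github.com/TobiasSkovgaardJepsen/paper-dist | build/analysis/csv/log_file_parsing.py | get_query_inf
-- ===== SOURCE A (Python) =====
-- def get_query_inf(query):
--     no_eg = query.count('EG')
--     no_ef = query.count('EF')
--     no_ex = query.count('EX')
--     no_eu = query.count('E') - no_eg - no_ef - no_ex
--
--     no_ag = query.count('AG')
--     no_af = query.count('AF')
--     no_ax = query.count('AX')
--     no_au = query.count('A') - no_ag - no_af - no_ax
--
--     no_disjunc = query.count('OR')
--     no_conjunc = query.count('AND')
--
--     no_negation = query.count('!')
--
--     nested_depth = 0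
--     c_nested_depth = 0
--     for ch in query:
--         if ch == '(':
--             c_nested_depth += 1
--         elif ch == ')':
--             c_nested_depth -= 1
--         if c_nested_depth > nested_depth:
--             nested_depth = c_nested_depth
--     result ={
--         'Query No. EG': no_eg,
--         'Query No. EF': no_ef,
--         'Query No. EX': no_ex,
--         'Query No. EU': no_eu,
--
--         'Query No. AG': no_ag,
--         'Query No. AF': no_af,
--         'Query No. AX': no_ax,
--         'Query No. AU': no_au,
--
--         'Query No. OR': no_disjunc,
--         'Query No. AND': no_conjunc,
--         'Query No. Negation': no_negation,
--         'Query Nested Depth': nested_depth,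
--
--     }
--
--     return result
-- ===== SOURCE B (Python) =====
-- def get_query_inf(query):
--     # single pass with one-character lookahead instead of twelve separate scans
--     eg = ef = ex = e = ag = af = ax = a = disj = conj = neg = 0
--     depth = 0
--     maxd = 0
--     n = len(query)
--     for i, ch in enumerate(query):
--         nxt = query[i + 1] if i + 1 < n else ''
--         if ch == 'E':
--             e += 1
--             if nxt == 'G':
--                 eg += 1
--             elif nxt == 'F':
--                 ef += 1
--             elif nxt == 'X':
--                 ex += 1
--         elif ch == 'A':
--             a += 1
--             if nxt == 'G':
--                 ag += 1
--             elif nxt == 'F':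
--                 af += 1
--             elif nxt == 'X':
--                 ax += 1
--             elif nxt == 'N' and i + 2 < n and query[i + 2] == 'D':
--                 conj += 1
--         elif ch == 'O':
--             if nxt == 'R':
--                 disj += 1
--         elif ch == '!':
--             neg += 1
--         elif ch == '(':
--             depth += 1
--             if depth > maxd:
--                 maxd = depth
--         elif ch == ')':
--             depth -= 1
--     return {
--         'Query No. EG': eg,
--         'Query No. EF': ef,
--         'Query No. EX': ex,
--         'Query No. EU': e - eg - ef - ex,
--         'Query No. AG': ag,
--         'Query No. AF': af,
--         'Query No. AX': ax,
--         'Query No. AU': a - ag - af - ax,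
--         'Query No. OR': disj,
--         'Query No. AND': conj,
--         'Query No. Negation': neg,
--         'Query Nested Depth': maxd,
--     }
-- ===== Notes on version B (the rewrite author's own statement) =====
-- stated objective: alternative
-- what changed: Replaced A's twelve separate scans of the query (eleven str.count calls plus a depth loop) by a single pass over the string that maintains all counters and the paren depth/max at once, using one- and two-character lookahead; the EU/AU values come from the same subtractions after the pass.
import Mathlib
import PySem

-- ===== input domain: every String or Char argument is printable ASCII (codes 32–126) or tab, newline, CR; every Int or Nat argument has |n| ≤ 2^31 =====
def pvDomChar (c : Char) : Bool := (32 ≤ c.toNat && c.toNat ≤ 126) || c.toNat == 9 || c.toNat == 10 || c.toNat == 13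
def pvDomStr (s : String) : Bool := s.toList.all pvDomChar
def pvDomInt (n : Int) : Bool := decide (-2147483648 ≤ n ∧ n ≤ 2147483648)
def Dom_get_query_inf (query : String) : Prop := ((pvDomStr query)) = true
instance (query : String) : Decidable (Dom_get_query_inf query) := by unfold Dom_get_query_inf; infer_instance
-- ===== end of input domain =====

-- B replaces A's twelve separate scans of the query by one pass with one-character lookahead.

-- ===== PORT A =====
-- A's paren-depth loop body: depth update, then 'if c_nested_depth > nested_depth'
def pvAStep (st : Int × Int) (ch : Char) : Int × Int :=
  let c := if ch = '(' then st.2 + 1 else if ch = ')' then st.2 - 1 else st.2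
  let n := if c > st.1 then c else st.1
  (n, c)

def get_query_inf (query : String) : List (String × Int) :=
  let no_eg : Int := PySem.Str.count query "EG"
  let no_ef : Int := PySem.Str.count query "EF"
  let no_ex : Int := PySem.Str.count query "EX"
  let no_eu : Int := (PySem.Str.count query "E" : Int) - no_eg - no_ef - no_ex
  let no_ag : Int := PySem.Str.count query "AG"
  let no_af : Int := PySem.Str.count query "AF"
  let no_ax : Int := PySem.Str.count query "AX"
  let no_au : Int := (PySem.Str.count query "A" : Int) - no_ag - no_af - no_ax
  let no_disjunc : Int := PySem.Str.count query "OR"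
  let no_conjunc : Int := PySem.Str.count query "AND"
  let no_negation : Int := PySem.Str.count query "!"
  let p := query.toList.foldl pvAStep (0, 0)
  [("Query No. EG", no_eg), ("Query No. EF", no_ef), ("Query No. EX", no_ex),
   ("Query No. EU", no_eu), ("Query No. AG", no_ag), ("Query No. AF", no_af),
   ("Query No. AX", no_ax), ("Query No. AU", no_au), ("Query No. OR", no_disjunc),
   ("Query No. AND", no_conjunc), ("Query No. Negation", no_negation),
   ("Query Nested Depth", p.1)]

-- ===== PORT B =====
-- B's counters (the loop state of Source B)
structure PvSt where
  eg : Int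
  ef : Int
  ex : Int
  e : Int
  ag : Int
  af : Int
  ax : Int
  a : Int
  disj : Int
  conj : Int
  neg : Int
  depth : Int
  maxd : Int
deriving DecidableEq, Repr

-- Source B's loop body: the lookahead query[i+1] / query[i+2] is the head / second element of the rest
def pvBStep (c : Char) (rest : List Char) (st : PvSt) : PvSt :=
  if c = 'E' then
    let s1 := { st with e := st.e + 1 }
    if rest.head? = some 'G' then { s1 with eg := s1.eg + 1 }
    else if rest.head? = some 'F' then { s1 with ef := s1.ef + 1 }
    else if rest.head? = some 'X' then { s1 with ex := s1.ex + 1 }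
    else s1
  else if c = 'A' then
    let s1 := { st with a := st.a + 1 }
    if rest.head? = some 'G' then { s1 with ag := s1.ag + 1 }
    else if rest.head? = some 'F' then { s1 with af := s1.af + 1 }
    else if rest.head? = some 'X' then { s1 with ax := s1.ax + 1 }
    else if rest.head? = some 'N' ∧ rest.tail.head? = some 'D' then { s1 with conj := s1.conj + 1 }
    else s1
  else if c = 'O' then
    if rest.head? = some 'R' then { st with disj := st.disj + 1 } else st
  else if c = '!' then { st with neg := st.neg + 1 }
  else if c = '(' then
    let d := st.depth + 1
    { st with depth := d, maxd := if d > st.maxd then d else st.maxd }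
  else if c = ')' then { st with depth := st.depth - 1 }
  else st

def pvBLoop : List Char → PvSt → PvSt
  | [], st => st
  | c :: rest, st => pvBLoop rest (pvBStep c rest st)

def get_query_inf_alt (query : String) : List (String × Int) :=
  let st := pvBLoop query.toList ⟨0,0,0,0,0,0,0,0,0,0,0,0,0⟩
  [("Query No. EG", st.eg), ("Query No. EF", st.ef), ("Query No. EX", st.ex),
   ("Query No. EU", st.e - st.eg - st.ef - st.ex),
   ("Query No. AG", st.ag), ("Query No. AF", st.af), ("Query No. AX", st.ax),
   ("Query No. AU", st.a - st.ag - st.af - st.ax),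
   ("Query No. OR", st.disj), ("Query No. AND", st.conj),
   ("Query No. Negation", st.neg), ("Query Nested Depth", st.maxd)]

-- ===== PRECONDITION & SPEC =====
def Spec_get_query_inf (query : String) (out : List (String × Int)) : Prop := out = get_query_inf_alt query
instance (query : String) (out : List (String × Int)) : Decidable (Spec_get_query_inf query out) := by unfold Spec_get_query_inf; infer_instance

-- ===== CLAIM (what is proved, stated in full; the proofs are below) =====
def Claim_equal_get_query_inf : Prop := ∀ (query : String), Dom_get_query_inf query → Spec_get_query_inf query (get_query_inf query)

-- ===== LEMMAS AND PROOFS =====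

-- number of positions whose character is c
def pvOcc1 (c : Char) : List Char → Nat
  | [] => 0
  | a :: t => (if a = c then 1 else 0) + pvOcc1 c t

-- number of positions where c0 is immediately followed by c1
def pvOcc2 (c0 c1 : Char) : List Char → Nat
  | [] => 0
  | a :: t => (if a = c0 ∧ t.head? = some c1 then 1 else 0) + pvOcc2 c0 c1 t

-- number of positions where c0, c1, c2 occur consecutively
def pvOcc3 (c0 c1 c2 : Char) : List Char → Nat
  | [] => 0
  | a :: t => (if a = c0 ∧ t.head? = some c1 ∧ t.tail.head? = some c2 then 1 else 0) + pvOcc3 c0 c1 c2 t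

theorem pvGo1 (c : Char) : ∀ (fuel : Nat) (s : List Char) (acc : Nat), s.length ≤ fuel →
    PySem.Chars.count.go [c] fuel s acc = acc + pvOcc1 c s := by
  intro fuel
  induction fuel with
  | zero =>
    intro s acc h
    have : s = [] := by cases s <;> simp_all
    subst this; simp [PySem.Chars.count.go, pvOcc1]
  | succ n ih =>
    intro s acc h
    cases s with
    | nil => simp [PySem.Chars.count.go, pvOcc1]
    | cons a t =>
      simp only [PySem.Chars.count.go]
      by_cases hac : a = c
      · subst hac
        have hp : [a].isPrefixOf (a :: t) = true := by simp [List.isPrefixOf]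
        simp only [hp, if_true, List.length_singleton, List.drop_succ_cons, List.drop_zero]
        rw [ih t (acc + 1) (by simpa using h)]
        simp [pvOcc1]; omega
      · have hp : [c].isPrefixOf (a :: t) = false := by
          simp [List.isPrefixOf]; exact fun h' => hac h'.symm
        simp only [hp, Bool.false_eq_true, if_false]
        rw [ih t acc (by simpa using h)]
        simp [pvOcc1, hac]

theorem pvGo2 (c0 c1 : Char) (hne : c0 ≠ c1) : ∀ (fuel : Nat) (s : List Char) (acc : Nat),
    s.length ≤ fuel →
    PySem.Chars.count.go [c0, c1] fuel s acc = acc + pvOcc2 c0 c1 s := by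
  intro fuel
  induction fuel with
  | zero =>
    intro s acc h
    have : s = [] := by cases s <;> simp_all
    subst this; simp [PySem.Chars.count.go, pvOcc2]
  | succ n ih =>
    intro s acc h
    cases s with
    | nil => simp [PySem.Chars.count.go, pvOcc2]
    | cons a t =>
      simp only [PySem.Chars.count.go]
      by_cases hp : [c0, c1].isPrefixOf (a :: t) = true
      · obtain ⟨t', rfl, rfl⟩ : ∃ t', a = c0 ∧ t = c1 :: t' := by
          cases t with
          | nil => simp [List.isPrefixOf] at hp
          | cons b t' =>
            simp [List.isPrefixOf] at hp
            exact ⟨t', hp.1.symm, by rw [hp.2]⟩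
        simp only [hp, if_true, List.length_cons, List.length_nil, List.drop_succ_cons, List.drop_zero]
        rw [ih t' (acc + 1) (by simp at h; omega)]
        simp [pvOcc2, Ne.symm hne]
        omega
      · simp only [hp]
        rw [ih t acc (by simpa using h)]
        have hno : ¬ (a = c0 ∧ t.head? = some c1) := by
          rintro ⟨rfl, hh⟩
          cases t with
          | nil => simp at hh
          | cons b t' =>
            simp at hh
            subst hh
            simp [List.isPrefixOf] at hp
        simp [pvOcc2, hno]

theorem pvGo3 (c0 c1 c2 : Char) (h1 : c0 ≠ c1) (h2 : c0 ≠ c2) :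
    ∀ (fuel : Nat) (s : List Char) (acc : Nat), s.length ≤ fuel →
    PySem.Chars.count.go [c0, c1, c2] fuel s acc = acc + pvOcc3 c0 c1 c2 s := by
  intro fuel
  induction fuel with
  | zero =>
    intro s acc h
    have : s = [] := by cases s <;> simp_all
    subst this; simp [PySem.Chars.count.go, pvOcc3]
  | succ n ih =>
    intro s acc h
    cases s with
    | nil => simp [PySem.Chars.count.go, pvOcc3]
    | cons a t =>
      simp only [PySem.Chars.count.go]
      by_cases hp : [c0, c1, c2].isPrefixOf (a :: t) = true
      · obtain ⟨t', rfl, rfl⟩ : ∃ t', a = c0 ∧ t = c1 :: c2 :: t' := by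
          cases t with
          | nil => simp [List.isPrefixOf] at hp
          | cons b u =>
            cases u with
            | nil => simp [List.isPrefixOf] at hp
            | cons d u' =>
              simp [List.isPrefixOf] at hp
              exact ⟨u', hp.1.symm, by rw [hp.2.1, hp.2.2]⟩
        simp only [hp, if_true, List.length_cons, List.length_nil, List.drop_succ_cons, List.drop_zero]
        rw [ih t' (acc + 1) (by simp at h; omega)]
        simp [pvOcc3, Ne.symm h1, Ne.symm h2]
        omega
      · simp only [hp]
        rw [ih t acc (by simpa using h)]
        have hno : ¬ (a = c0 ∧ t.head? = some c1 ∧ t[1]? = some c2) := by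
          rintro ⟨rfl, hh, hh2⟩
          cases t with
          | nil => simp at hh
          | cons b u =>
            simp at hh; subst hh
            cases u with
            | nil => simp at hh2
            | cons d u' =>
              simp at hh2; subst hh2
              simp [List.isPrefixOf] at hp
        simp [pvOcc3, hno]

theorem pvCount1 (s : List Char) (c : Char) :
    PySem.Chars.count s [c] = pvOcc1 c s := by
  rw [show PySem.Chars.count s [c] = PySem.Chars.count.go [c] s.length s 0 by
    simp [PySem.Chars.count]]
  rw [pvGo1 c s.length s 0 le_rfl]; omega

theorem pvCount2 (s : List Char) (c0 c1 : Char) (h : c0 ≠ c1) :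
    PySem.Chars.count s [c0, c1] = pvOcc2 c0 c1 s := by
  rw [show PySem.Chars.count s [c0, c1] = PySem.Chars.count.go [c0, c1] s.length s 0 by
    simp [PySem.Chars.count]]
  rw [pvGo2 c0 c1 h s.length s 0 le_rfl]; omega

theorem pvCount3 (s : List Char) (c0 c1 c2 : Char) (h1 : c0 ≠ c1) (h2 : c0 ≠ c2) :
    PySem.Chars.count s [c0, c1, c2] = pvOcc3 c0 c1 c2 s := by
  rw [show PySem.Chars.count s [c0, c1, c2] = PySem.Chars.count.go [c0, c1, c2] s.length s 0 by
    simp [PySem.Chars.count]]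
  rw [pvGo3 c0 c1 c2 h1 h2 s.length s 0 le_rfl]; omega

theorem pvBStep_inv (c : Char) (rest : List Char) (st : PvSt) (h : st.depth ≤ st.maxd) :
    (pvBStep c rest st).depth ≤ (pvBStep c rest st).maxd := by
  unfold pvBStep
  split_ifs <;> first | omega | (simp; omega)

-- one-step lemmas: each field of Source B's loop body
theorem pvStep_eg (c : Char) (rest : List Char) (st : PvSt) :
    (pvBStep c rest st).eg = st.eg + (if c = 'E' ∧ rest.head? = some 'G' then 1 else 0) := by
  unfold pvBStep; split_ifs <;> simp_all

theorem pvStep_ef (c : Char) (rest : List Char) (st : PvSt) :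
    (pvBStep c rest st).ef = st.ef + (if c = 'E' ∧ rest.head? = some 'F' then 1 else 0) := by
  unfold pvBStep; split_ifs <;> simp_all

theorem pvStep_ex (c : Char) (rest : List Char) (st : PvSt) :
    (pvBStep c rest st).ex = st.ex + (if c = 'E' ∧ rest.head? = some 'X' then 1 else 0) := by
  unfold pvBStep; split_ifs <;> simp_all

theorem pvStep_e (c : Char) (rest : List Char) (st : PvSt) :
    (pvBStep c rest st).e = st.e + (if c = 'E' then 1 else 0) := by
  unfold pvBStep; split_ifs <;> simp_all

theorem pvStep_ag (c : Char) (rest : List Char) (st : PvSt) :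
    (pvBStep c rest st).ag = st.ag + (if c = 'A' ∧ rest.head? = some 'G' then 1 else 0) := by
  unfold pvBStep; split_ifs <;> simp_all

theorem pvStep_af (c : Char) (rest : List Char) (st : PvSt) :
    (pvBStep c rest st).af = st.af + (if c = 'A' ∧ rest.head? = some 'F' then 1 else 0) := by
  unfold pvBStep; split_ifs <;> simp_all

theorem pvStep_ax (c : Char) (rest : List Char) (st : PvSt) :
    (pvBStep c rest st).ax = st.ax + (if c = 'A' ∧ rest.head? = some 'X' then 1 else 0) := by
  unfold pvBStep; split_ifs <;> simp_all

theorem pvStep_a (c : Char) (rest : List Char) (st : PvSt) :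
    (pvBStep c rest st).a = st.a + (if c = 'A' then 1 else 0) := by
  unfold pvBStep; split_ifs <;> simp_all

theorem pvStep_disj (c : Char) (rest : List Char) (st : PvSt) :
    (pvBStep c rest st).disj = st.disj + (if c = 'O' ∧ rest.head? = some 'R' then 1 else 0) := by
  unfold pvBStep; split_ifs <;> simp_all

theorem pvStep_conj (c : Char) (rest : List Char) (st : PvSt) :
    (pvBStep c rest st).conj = st.conj +
      (if c = 'A' ∧ rest.head? = some 'N' ∧ rest.tail.head? = some 'D' then 1 else 0) := by
  unfold pvBStep; split_ifs <;> simp_all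

theorem pvStep_neg (c : Char) (rest : List Char) (st : PvSt) :
    (pvBStep c rest st).neg = st.neg + (if c = '!' then 1 else 0) := by
  unfold pvBStep; split_ifs <;> simp_all

theorem pvStep_dm (c : Char) (rest : List Char) (st : PvSt) (h : st.depth ≤ st.maxd) :
    ((pvBStep c rest st).maxd, (pvBStep c rest st).depth) = pvAStep (st.maxd, st.depth) c := by
  unfold pvBStep pvAStep
  split_ifs <;> simp_all <;> omega

-- the per-field loop lemmas
theorem pvLoop_eg : ∀ (l : List Char) (st : PvSt),
    (pvBLoop l st).eg = st.eg + (pvOcc2 'E' 'G' l : Int) := by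
  intro l
  induction l with
  | nil => intro st; simp [pvBLoop, pvOcc2]
  | cons c rest ih =>
    intro st
    rw [show pvBLoop (c :: rest) st = pvBLoop rest (pvBStep c rest st) from rfl, ih, pvStep_eg]
    simp only [pvOcc2]
    push_cast
    split_ifs <;> omega

theorem pvLoop_ef : ∀ (l : List Char) (st : PvSt),
    (pvBLoop l st).ef = st.ef + (pvOcc2 'E' 'F' l : Int) := by
  intro l
  induction l with
  | nil => intro st; simp [pvBLoop, pvOcc2]
  | cons c rest ih =>
    intro st
    rw [show pvBLoop (c :: rest) st = pvBLoop rest (pvBStep c rest st) from rfl, ih, pvStep_ef]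
    simp only [pvOcc2]
    push_cast
    split_ifs <;> omega

theorem pvLoop_ex : ∀ (l : List Char) (st : PvSt),
    (pvBLoop l st).ex = st.ex + (pvOcc2 'E' 'X' l : Int) := by
  intro l
  induction l with
  | nil => intro st; simp [pvBLoop, pvOcc2]
  | cons c rest ih =>
    intro st
    rw [show pvBLoop (c :: rest) st = pvBLoop rest (pvBStep c rest st) from rfl, ih, pvStep_ex]
    simp only [pvOcc2]
    push_cast
    split_ifs <;> omega

theorem pvLoop_e : ∀ (l : List Char) (st : PvSt),
    (pvBLoop l st).e = st.e + (pvOcc1 'E' l : Int) := by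
  intro l
  induction l with
  | nil => intro st; simp [pvBLoop, pvOcc1]
  | cons c rest ih =>
    intro st
    rw [show pvBLoop (c :: rest) st = pvBLoop rest (pvBStep c rest st) from rfl, ih, pvStep_e]
    simp only [pvOcc1]
    push_cast
    split_ifs <;> omega

theorem pvLoop_ag : ∀ (l : List Char) (st : PvSt),
    (pvBLoop l st).ag = st.ag + (pvOcc2 'A' 'G' l : Int) := by
  intro l
  induction l with
  | nil => intro st; simp [pvBLoop, pvOcc2]
  | cons c rest ih =>
    intro st
    rw [show pvBLoop (c :: rest) st = pvBLoop rest (pvBStep c rest st) from rfl, ih, pvStep_ag]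
    simp only [pvOcc2]
    push_cast
    split_ifs <;> omega

theorem pvLoop_af : ∀ (l : List Char) (st : PvSt),
    (pvBLoop l st).af = st.af + (pvOcc2 'A' 'F' l : Int) := by
  intro l
  induction l with
  | nil => intro st; simp [pvBLoop, pvOcc2]
  | cons c rest ih =>
    intro st
    rw [show pvBLoop (c :: rest) st = pvBLoop rest (pvBStep c rest st) from rfl, ih, pvStep_af]
    simp only [pvOcc2]
    push_cast
    split_ifs <;> omega

theorem pvLoop_ax : ∀ (l : List Char) (st : PvSt),
    (pvBLoop l st).ax = st.ax + (pvOcc2 'A' 'X' l : Int) := by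
  intro l
  induction l with
  | nil => intro st; simp [pvBLoop, pvOcc2]
  | cons c rest ih =>
    intro st
    rw [show pvBLoop (c :: rest) st = pvBLoop rest (pvBStep c rest st) from rfl, ih, pvStep_ax]
    simp only [pvOcc2]
    push_cast
    split_ifs <;> omega

theorem pvLoop_a : ∀ (l : List Char) (st : PvSt),
    (pvBLoop l st).a = st.a + (pvOcc1 'A' l : Int) := by
  intro l
  induction l with
  | nil => intro st; simp [pvBLoop, pvOcc1]
  | cons c rest ih =>
    intro st
    rw [show pvBLoop (c :: rest) st = pvBLoop rest (pvBStep c rest st) from rfl, ih, pvStep_a]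
    simp only [pvOcc1]
    push_cast
    split_ifs <;> omega

theorem pvLoop_disj : ∀ (l : List Char) (st : PvSt),
    (pvBLoop l st).disj = st.disj + (pvOcc2 'O' 'R' l : Int) := by
  intro l
  induction l with
  | nil => intro st; simp [pvBLoop, pvOcc2]
  | cons c rest ih =>
    intro st
    rw [show pvBLoop (c :: rest) st = pvBLoop rest (pvBStep c rest st) from rfl, ih, pvStep_disj]
    simp only [pvOcc2]
    push_cast
    split_ifs <;> omega

theorem pvLoop_conj : ∀ (l : List Char) (st : PvSt),
    (pvBLoop l st).conj = st.conj + (pvOcc3 'A' 'N' 'D' l : Int) := by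
  intro l
  induction l with
  | nil => intro st; simp [pvBLoop, pvOcc3]
  | cons c rest ih =>
    intro st
    rw [show pvBLoop (c :: rest) st = pvBLoop rest (pvBStep c rest st) from rfl, ih, pvStep_conj]
    simp only [pvOcc3]
    push_cast
    split_ifs <;> omega

theorem pvLoop_neg : ∀ (l : List Char) (st : PvSt),
    (pvBLoop l st).neg = st.neg + (pvOcc1 '!' l : Int) := by
  intro l
  induction l with
  | nil => intro st; simp [pvBLoop, pvOcc1]
  | cons c rest ih =>
    intro st
    rw [show pvBLoop (c :: rest) st = pvBLoop rest (pvBStep c rest st) from rfl, ih, pvStep_neg]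
    simp only [pvOcc1]
    push_cast
    split_ifs <;> omega

theorem pvLoop_dm : ∀ (l : List Char) (st : PvSt), st.depth ≤ st.maxd →
    ((pvBLoop l st).maxd, (pvBLoop l st).depth) = l.foldl pvAStep (st.maxd, st.depth) := by
  intro l
  induction l with
  | nil => intro st h; simp [pvBLoop]
  | cons c rest ih =>
    intro st h
    rw [show pvBLoop (c :: rest) st = pvBLoop rest (pvBStep c rest st) from rfl,
        ih _ (pvBStep_inv c rest st h), List.foldl_cons, pvStep_dm c rest st h]

-- ===== VERDICT (by name: the statement is the Claim_ definition above) =====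
theorem get_query_inf_spec : Claim_equal_get_query_inf := by
  intro query _
  unfold Spec_get_query_inf get_query_inf get_query_inf_alt
  have hdm := pvLoop_dm query.toList ⟨0,0,0,0,0,0,0,0,0,0,0,0,0⟩ le_rfl
  have hmax : (pvBLoop query.toList ⟨0,0,0,0,0,0,0,0,0,0,0,0,0⟩).maxd
      = (query.toList.foldl pvAStep (0, 0)).1 := congrArg Prod.fst hdm
  simp only [PySem.Str.count]
  rw [show "EG".toList = ['E','G'] from rfl, show "EF".toList = ['E','F'] from rfl,
      show "EX".toList = ['E','X'] from rfl, show "E".toList = ['E'] from rfl,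
      show "AG".toList = ['A','G'] from rfl, show "AF".toList = ['A','F'] from rfl,
      show "AX".toList = ['A','X'] from rfl, show "A".toList = ['A'] from rfl,
      show "OR".toList = ['O','R'] from rfl, show "AND".toList = ['A','N','D'] from rfl,
      show "!".toList = ['!'] from rfl]
  rw [pvCount1, pvCount1, pvCount1,
      pvCount2 _ _ _ (by decide), pvCount2 _ _ _ (by decide), pvCount2 _ _ _ (by decide),
      pvCount2 _ _ _ (by decide), pvCount2 _ _ _ (by decide), pvCount2 _ _ _ (by decide),
      pvCount2 _ _ _ (by decide), pvCount3 _ _ _ _ (by decide) (by decide)]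
  simp [pvLoop_eg, pvLoop_ef, pvLoop_ex, pvLoop_e, pvLoop_ag, pvLoop_af, pvLoop_ax,
        pvLoop_a, pvLoop_disj, pvLoop_conj, pvLoop_neg, hmax]
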